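-- pv_equiv track=rewrite | github.com/daniel-reich/ubiquitous-fiesta | 2NPjN7DDvyi6f5CHF_12.py | age_difference
-- ===== SOURCE A (Python) =====
-- def age_difference(f_age, s_age):
--   udif = 0
--   ddif = 0
--   ftemp = f_age
--   stemp = s_age
--   while True:
--     if stemp*2==ftemp or s_age*2==f_age:
--       break
--     udif+=1
--     ddif+=1
--     s_age+=1
--     f_age+=1
--     ftemp-=1
--     stemp-=1
--   return min(udif,ddif)
-- ===== SOURCE B (Python) =====
-- def age_difference(f_age, s_age):
--   return abs(f_age - 2*s_age)
-- ===== Notes on version B (the rewrite author's own statement) =====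
-- stated objective: faster
-- what changed: Replaced the step-counting loop (which increments/decrements four counters until a doubling relation holds) by the closed form abs(f_age - 2*s_age).
import Mathlib
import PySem

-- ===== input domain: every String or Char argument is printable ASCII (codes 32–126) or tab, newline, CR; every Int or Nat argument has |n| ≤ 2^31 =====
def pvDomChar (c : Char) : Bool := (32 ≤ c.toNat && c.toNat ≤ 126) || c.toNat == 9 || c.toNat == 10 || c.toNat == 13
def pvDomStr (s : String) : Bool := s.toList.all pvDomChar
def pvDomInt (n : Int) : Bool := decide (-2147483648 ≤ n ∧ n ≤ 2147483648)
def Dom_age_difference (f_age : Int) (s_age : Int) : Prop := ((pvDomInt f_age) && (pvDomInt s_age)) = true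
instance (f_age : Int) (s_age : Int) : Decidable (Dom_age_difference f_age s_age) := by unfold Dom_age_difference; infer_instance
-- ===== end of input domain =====

-- B replaces A's step-counting while-loop by the closed form |f_age - 2*s_age| (O(1) vs O(|f-2s|)).
-- ===== PORT A =====
-- A's `while True` loop, step for step; the fuel only makes the computation total
-- (lemma ageLoop_spec shows the chosen fuel is always enough, so fuel 0 is never reached on A's entry states).
def ageLoop (fuel : Nat) (udif ddif s_age f_age ftemp stemp : Int) : Int :=
  match fuel with
  | 0 => min udif ddif
  | fuel + 1 =>
    if stemp * 2 = ftemp ∨ s_age * 2 = f_age then min udif ddif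
    else ageLoop fuel (udif + 1) (ddif + 1) (s_age + 1) (f_age + 1) (ftemp - 1) (stemp - 1)

def age_difference (f_age : Int) (s_age : Int) : Int :=
  ageLoop ((f_age - 2 * s_age).natAbs + 1) 0 0 s_age f_age f_age s_age

-- ===== PORT B =====
def age_difference_alt (f_age : Int) (s_age : Int) : Int := |f_age - 2 * s_age|

-- ===== PRECONDITION & SPEC =====
def Spec_age_difference (f_age : Int) (s_age : Int) (out : Int) : Prop := out = age_difference_alt f_age s_age
instance (f_age : Int) (s_age : Int) (out : Int) : Decidable (Spec_age_difference f_age s_age out) := by unfold Spec_age_difference; infer_instance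

-- ===== CLAIM (what is proved, stated in full; the proofs are below) =====
def Claim_equal_age_difference : Prop := ∀ (f_age : Int) (s_age : Int), Dom_age_difference f_age s_age → Spec_age_difference f_age s_age (age_difference f_age s_age)

-- ===== LEMMAS AND PROOFS =====
-- After k loop iterations from entry state (f0, s0) the state is
-- udif = ddif = k, s_age = s0+k, f_age = f0+k, ftemp = f0-k, stemp = s0-k;
-- the loop stops exactly when k = |f0 - 2*s0|.
lemma ageLoop_spec (n : Nat) : ∀ (f0 s0 : Int) (k : Nat),
    k ≤ (f0 - 2 * s0).natAbs → (f0 - 2 * s0).natAbs - k < n →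
    ageLoop n k k (s0 + k) (f0 + k) (f0 - k) (s0 - k) = |f0 - 2 * s0| := by
  induction n with
  | zero => intro f0 s0 k hk hn; omega
  | succ n ih =>
    intro f0 s0 k hk hn
    rw [ageLoop]
    by_cases h : (s0 - (k : Int)) * 2 = f0 - k ∨ (s0 + (k : Int)) * 2 = f0 + k
    · rw [if_pos h]
      rcases h with h | h
      · have : |f0 - 2 * s0| = (k : Int) := by
          rw [abs_eq (by positivity)]; right; linarith
        simp [this]
      · have : |f0 - 2 * s0| = (k : Int) := by
          rw [abs_eq (by positivity)]; left; linarith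
        simp [this]
    · rw [if_neg h]
      push Not at h
      have hne : (f0 - 2 * s0).natAbs ≠ k := by
        intro heq
        rcases Int.natAbs_eq (f0 - 2 * s0) with he | he <;> rw [heq] at he <;>
          [exact h.2 (by linarith); exact h.1 (by linarith)]
      have h1 : ((k : Nat) + 1 : Nat) ≤ (f0 - 2 * s0).natAbs := by omega
      have := ih f0 s0 (k + 1) h1 (by omega)
      push_cast at this ⊢
      convert this using 2 <;> ring

-- ===== VERDICT (by name: the statement is the Claim_ definition above) =====
theorem age_difference_spec : Claim_equal_age_difference := by
  intro f_age s_age _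
  unfold Spec_age_difference age_difference age_difference_alt
  have := ageLoop_spec ((f_age - 2 * s_age).natAbs + 1) f_age s_age 0
    (by omega) (by omega)
  simpa using this
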